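-- pv_equiv track=rewrite | github.com/dp-web4/HRM | sage/experiments/phase1-hierarchical-cognitive/epistemic_bias_mapping/exploration/experiment_orchestrator.py | _detect_pattern_collapse
-- ===== SOURCE A (Python) =====
-- def _detect_pattern_collapse(response: str) -> bool:
--     """Detect repetitive patterns"""
--
--     words = response.lower().split()
--     if len(words) < 10:
--         return False
--
--     # Check for 3-word phrase repetition
--     phrase_counts = {}
--     for i in range(len(words) - 2):
--         phrase = ' '.join(words[i:i+3])
--         phrase_counts[phrase] = phrase_counts.get(phrase, 0) + 1
--
--     max_repetition = max(phrase_counts.values()) if phrase_counts else 0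
--
--     # Collapse if any phrase repeats 3+ times
--     if max_repetition >= 3:
--         return True
--
--     # Check for known collapse patterns
--     if "capital of france" in response.lower():
--         if response.lower().count("capital of france") >= 2:
--             return True
--
--     return False
-- ===== SOURCE B (Python) =====
-- def _detect_pattern_collapse(response: str) -> bool:
--     """Detect repetitive patterns (sort-then-scan instead of dict counting)"""
--
--     text = response.lower()
--     words = text.split()
--     if len(words) < 10:
--         return False
--
--     # Sort all consecutive 3-word phrases: a phrase occurs 3+ times
--     # iff some sorted element equals the one two positions later.
--     phrases = sorted(' '.join(words[i:i + 3]) for i in range(len(words) - 2))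
--     for i in range(len(phrases) - 2):
--         if phrases[i] == phrases[i + 2]:
--             return True
--
--     if "capital of france" in text and text.count("capital of france") >= 2:
--         return True
--
--     return False
-- ===== Notes on version B (the rewrite author's own statement) =====
-- stated objective: alternative
-- what changed: Replaces the dict-of-phrase-counts plus max with sorting the 3-word phrase list and scanning it once: a phrase repeats 3+ times iff some sorted element equals the element two positions later; the france check is flattened into one condition.
import Mathlib
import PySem

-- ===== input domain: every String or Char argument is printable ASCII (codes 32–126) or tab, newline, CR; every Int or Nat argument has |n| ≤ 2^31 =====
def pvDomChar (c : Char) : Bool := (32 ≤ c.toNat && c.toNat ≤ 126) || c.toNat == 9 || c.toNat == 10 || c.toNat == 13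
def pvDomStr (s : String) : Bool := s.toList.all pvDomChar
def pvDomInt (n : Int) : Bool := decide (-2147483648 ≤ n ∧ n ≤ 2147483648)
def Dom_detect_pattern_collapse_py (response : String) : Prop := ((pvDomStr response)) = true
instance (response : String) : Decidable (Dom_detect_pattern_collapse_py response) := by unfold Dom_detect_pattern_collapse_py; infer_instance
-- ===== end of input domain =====

-- B replaces A's dict of 3-word-phrase counts with sort-then-scan (equal elements two apart in the sorted phrase list); alternative decomposition, no speed claim.

-- ===== PORT A =====
def detect_pattern_collapse_py (response : String) : Bool :=
  let words := PySem.Str.split₀ (PySem.Str.lower response)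
  if words.length < 10 then false
  else
    let phrase_counts :=
      (PySem.List.pyRange 0 ((words.length : Int) - 2) 1).foldl
        (fun d i =>
          let phrase := PySem.Str.join " " (PySem.List.slice words (some i) (some (i + 3)))
          d.insert phrase (d.getD phrase 0 + 1))
        PySem.Dict.empty
    let max_repetition : Int :=
      if phrase_counts.size ≠ 0 then (PySem.List.max? phrase_counts.values (fun v => v)).getD 0 else 0
    if 3 ≤ max_repetition then true
    else if PySem.Str.isIn "capital of france" (PySem.Str.lower response) then
      if 2 ≤ PySem.Str.count (PySem.Str.lower response) "capital of france" then true else false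
    else false

-- ===== PORT B =====
def detect_pattern_collapse_py_alt (response : String) : Bool :=
  let text := PySem.Str.lower response
  let words := PySem.Str.split₀ text
  if words.length < 10 then false
  else
    let phrases :=
      PySem.List.sorted
        ((PySem.List.pyRange 0 ((words.length : Int) - 2) 1).map
          (fun i => PySem.Str.join " " (PySem.List.slice words (some i) (some (i + 3)))))
        (fun x => x) false
    if (PySem.List.pyRange 0 ((phrases.length : Int) - 2) 1).any
        (fun i => PySem.List.pyGetD phrases i "" == PySem.List.pyGetD phrases (i + 2) "") then true
    else if PySem.Str.isIn "capital of france" text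
            && decide (2 ≤ PySem.Str.count text "capital of france") then true
    else false

-- ===== PRECONDITION & SPEC =====
def Spec_detect_pattern_collapse_py (response : String) (out : Bool) : Prop := out = detect_pattern_collapse_py_alt response
instance (response : String) (out : Bool) : Decidable (Spec_detect_pattern_collapse_py response out) := by unfold Spec_detect_pattern_collapse_py; infer_instance

-- ===== CLAIM (what is proved, stated in full; the proofs are below) =====
def Claim_equal_detect_pattern_collapse_py : Prop := ∀ (response : String), Dom_detect_pattern_collapse_py response → Spec_detect_pattern_collapse_py response (detect_pattern_collapse_py response)

-- ===== LEMMAS AND PROOFS =====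

theorem sorted_head_eq {x : String} {t : List String} (ht : t.Pairwise (· ≤ ·))
    (hx : x ∈ t) (hle : ∀ y ∈ t, x ≤ y) : ∃ t', t = x :: t' := by
  cases t with
  | nil => simp at hx
  | cons b t' =>
    rcases List.pairwise_cons.mp ht with ⟨hb, _⟩
    have hbx : b ≤ x := by
      rcases List.mem_cons.mp hx with h | h
      · exact le_of_eq h.symm
      · exact hb x h
    have hxb : x ≤ b := hle b (List.mem_cons_self)
    exact ⟨t', by rw [le_antisymm hbx hxb]⟩

theorem fwd3 : ∀ (s : List String), s.Pairwise (· ≤ ·) → ∀ x : String, 3 ≤ s.count x →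
    ∃ k : Nat, k + 2 < s.length ∧ s.getD k "" = s.getD (k + 2) "" := by
  intro s
  induction s with
  | nil => intro _ x hc; simp at hc
  | cons a t ih =>
    intro hp x hc
    rcases List.pairwise_cons.mp hp with ⟨ha, ht⟩
    by_cases hax : a = x
    · subst hax
      rw [List.count_cons_self] at hc
      have hm1 : a ∈ t := List.count_pos_iff.mp (by omega)
      rcases sorted_head_eq ht hm1 ha with ⟨t', rfl⟩
      rw [List.count_cons_self] at hc
      rcases List.pairwise_cons.mp ht with ⟨ha', ht'⟩
      have hm2 : a ∈ t' := List.count_pos_iff.mp (by omega)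
      rcases sorted_head_eq ht' hm2 ha' with ⟨t'', rfl⟩
      refine ⟨0, by simp, by simp⟩
    · rw [List.count_cons_of_ne (a := x) (b := a) hax] at hc
      rcases ih ht x hc with ⟨k, hk, he⟩
      exact ⟨k + 1, by simpa using hk, by simpa using he⟩

theorem bwd3 (s : List String) (hs : s.Pairwise (· ≤ ·)) (k : Nat) (hk : k + 2 < s.length)
    (he : s.getD k "" = s.getD (k + 2) "") : ∃ x, 3 ≤ s.count x := by
  have h0 : k < s.length := by omega
  have h1 : k + 1 < s.length := by omega
  have hg := List.pairwise_iff_getElem.mp hs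
  have e1 : s[k] ≤ s[k+1] := hg k (k+1) h0 h1 (by omega)
  have e2 : s[k+1] ≤ s[k+2] := hg (k+1) (k+2) h1 hk (by omega)
  have e3 : s[k] = s[k+2] := by
    rwa [List.getD_eq_getElem s "" h0, List.getD_eq_getElem s "" hk] at he
  have q1 : s[k+1] = s[k] := le_antisymm (e3 ▸ e2) e1
  have hd : s.drop k = s[k] :: s[k] :: s[k] :: s.drop (k+3) := by
    rw [List.drop_eq_getElem_cons h0, List.drop_eq_getElem_cons h1, List.drop_eq_getElem_cons hk]
    rw [q1, ← e3]
  refine ⟨s[k], le_trans ?_ ((List.drop_sublist k s).count_le _)⟩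
  rw [hd]; simp [List.count_cons_self]

theorem cond_B_iff (ph : List String) :
    ((PySem.List.pyRange 0 (((PySem.List.sorted ph (fun x => x) false).length : Int) - 2) 1).any
      (fun i => PySem.List.pyGetD (PySem.List.sorted ph (fun x => x) false) i ""
         == PySem.List.pyGetD (PySem.List.sorted ph (fun x => x) false) (i + 2) "") = true)
    ↔ (∃ x, 3 ≤ (PySem.List.sorted ph (fun x => x) false).count x) := by
  set s := PySem.List.sorted ph (fun x => x) false with hsdef
  have hs : s.Pairwise (· ≤ ·) := PySem.List.sorted_pairwise ph (fun x => x)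
  rw [List.any_eq_true]
  constructor
  · rintro ⟨i, hi, hpi⟩
    rw [PySem.List.mem_pyRange_one] at hi
    obtain ⟨h0, h2⟩ := hi
    set k := i.toNat with hk
    have hik : i = (k : Int) := (Int.toNat_of_nonneg h0).symm
    have hklt : k + 2 < s.length := by omega
    apply bwd3 s hs k hklt
    rw [hik] at hpi
    have h2' : i + 2 = ((k + 2 : Nat) : Int) := by omega
    have h2'' : ((k:Int) + 2) = ((k + 2 : Nat) : Int) := by omega
    rw [h2''] at hpi
    simp only [PySem.List.pyGetD_natCast] at hpi
    exact beq_iff_eq.mp hpi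
  · rintro ⟨x, hx⟩
    rcases fwd3 s hs x hx with ⟨k, hklt, he⟩
    refine ⟨(k : Int), ?_, ?_⟩
    · rw [PySem.List.mem_pyRange_one]; omega
    · have h2' : (k : Int) + 2 = ((k + 2 : Nat) : Int) := by omega
      rw [h2']
      simp only [PySem.List.pyGetD_natCast]
      exact beq_iff_eq.mpr he

theorem cond_A_iff (ph : List String) (hne : ph ≠ []) :
    (3 ≤ (if (PySem.Dict.counter ph).size ≠ 0
          then (PySem.List.max? (PySem.Dict.counter ph).values (fun v => v)).getD 0 else (0:Int)))
    ↔ (∃ x, 3 ≤ ph.count x) := by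
  have hval : (PySem.Dict.counter ph).values
      = (PySem.Set.ofList ph).map (fun k => (ph.count k : Int)) := by
    show ((PySem.Dict.counter ph).items).map (·.2) = _
    rw [PySem.Dict.items_counter]
    simp [List.map_map]
  have hvne : (PySem.Dict.counter ph).values ≠ [] := by
    rw [hval]
    rcases List.exists_mem_of_ne_nil ph hne with ⟨a, ha⟩
    intro h
    have : a ∈ PySem.Set.ofList ph := (PySem.Set.mem_ofList _ _).mpr ha
    simp [List.map_eq_nil_iff] at h
    rw [h] at this; simp at this
  have hsz : (PySem.Dict.counter ph).size ≠ 0 := by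
    intro h
    apply hvne
    have hit : (PySem.Dict.counter ph).items = [] := List.eq_nil_of_length_eq_zero h
    show ((PySem.Dict.counter ph).items).map (·.2) = []
    rw [hit]; rfl
  rw [if_pos hsz]
  obtain ⟨m, hm⟩ : ∃ m, PySem.List.max? (PySem.Dict.counter ph).values (fun v => v) = some m := by
    rcases h : PySem.List.max? (PySem.Dict.counter ph).values (fun v => v) with _ | m
    · exact absurd ((PySem.List.max?_eq_none_iff _ _).mp h) hvne
    · exact ⟨m, rfl⟩
  rw [hm]
  simp only [Option.getD_some]
  have hmem : m ∈ (PySem.Dict.counter ph).values := PySem.List.max?_mem hm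
  have hmax : ∀ y ∈ (PySem.Dict.counter ph).values, y ≤ m := by
    intro y hy; exact PySem.List.max?_isMax hm y hy
  constructor
  · intro h3
    rw [hval] at hmem
    rcases List.mem_map.mp hmem with ⟨k, _, hk⟩
    refine ⟨k, ?_⟩
    have h3' : (3:Int) ≤ (ph.count k : Int) := hk ▸ h3
    exact_mod_cast h3'
  · rintro ⟨x, hx⟩
    have : ((ph.count x : Int)) ∈ (PySem.Dict.counter ph).values := by
      rw [hval]
      exact List.mem_map.mpr ⟨x, (PySem.Set.mem_ofList _ _).mpr (List.count_pos_iff.mp (by omega)), rfl⟩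
    have := hmax _ this
    omega

theorem main_eq (response : String) :
    detect_pattern_collapse_py response = detect_pattern_collapse_py_alt response := by
  unfold detect_pattern_collapse_py detect_pattern_collapse_py_alt
  dsimp only
  set words := PySem.Str.split₀ (PySem.Str.lower response) with hw
  by_cases h10 : words.length < 10
  · simp only [if_pos h10]
  · simp only [if_neg h10]
    set ph := (PySem.List.pyRange 0 ((words.length : Int) - 2) 1).map
        (fun i => PySem.Str.join " " (PySem.List.slice words (some i) (some (i + 3)))) with hph
    have hne : ph ≠ [] := by
      rw [hph]
      intro h
      have hlen := congrArg List.length h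
      rw [List.length_map, PySem.List.length_pyRange_one] at hlen
      simp at hlen
      omega
    have hfold : (PySem.List.pyRange 0 ((words.length : Int) - 2) 1).foldl
        (fun d i => d.insert (PySem.Str.join " " (PySem.List.slice words (some i) (some (i + 3))))
            (d.getD (PySem.Str.join " " (PySem.List.slice words (some i) (some (i + 3)))) 0 + 1))
        PySem.Dict.empty = PySem.Dict.counter ph := by
      rw [hph, ← PySem.Dict.foldl_insert_getD_add_one_eq_counter]
      exact (List.foldl_map
        (f := fun i => PySem.Str.join " " (PySem.List.slice words (some i) (some (i + 3))))
        (g := fun (d : PySem.Dict String Int) p => d.insert p (d.getD p 0 + 1))).symm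
    rw [hfold]
    have hcc : (∃ x, 3 ≤ (PySem.List.sorted ph (fun x => x) false).count x) ↔ (∃ x, 3 ≤ ph.count x) := by
      constructor <;> rintro ⟨x, hx⟩ <;> refine ⟨x, ?_⟩
      · rwa [(PySem.List.sorted_perm ph (fun x => x) false).count_eq] at hx
      · rwa [(PySem.List.sorted_perm ph (fun x => x) false).count_eq]
    have hAB := (cond_A_iff ph hne).trans ((cond_B_iff ph).trans hcc).symm
    by_cases hA : 3 ≤ (if (PySem.Dict.counter ph).size ≠ 0
          then (PySem.List.max? (PySem.Dict.counter ph).values (fun v => v)).getD 0 else (0:Int))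
    · rw [if_pos hA, if_pos (hAB.mp hA)]
    · rw [if_neg hA, if_neg (fun h => hA (hAB.mpr h))]
      simp

-- ===== VERDICT (by name: the statement is the Claim_ definition above) =====
theorem detect_pattern_collapse_py_spec : Claim_equal_detect_pattern_collapse_py := by
  intro response _
  unfold Spec_detect_pattern_collapse_py
  exact main_eq response
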